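-- pv_equiv track=rewrite | github.com/Yejin6911/piro12 | 2주차 금요일 과제/1번.py | find
-- ===== SOURCE A (Python) =====
-- def find(n):
--     result = 0
--     for i in range(n):
--         sum = i
--         for x in str(i):
--             sum += int(x)
--         if(sum==n):
--             result = i
--             break
--     return result
-- ===== SOURCE B (Python) =====
-- def find(n):
--     start = max(0, n - 9 * len(str(n)))
--     for i in range(start, n):
--         s, m = i, i
--         while m:
--             s += m % 10
--             m //= 10
--         if s == n:
--             return i
--     return 0
-- ===== Notes on version B (the rewrite author's own statement) =====
-- stated objective: faster
-- what changed: Instead of scanning every candidate below n and summing the digits of its decimal string, B scans only a short final window (of width nine times the digit count of n, since a generator's digit sum is bounded by that) and computes digit sums arithmetically with modulo and floor division instead of string conversion.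
import Mathlib
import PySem

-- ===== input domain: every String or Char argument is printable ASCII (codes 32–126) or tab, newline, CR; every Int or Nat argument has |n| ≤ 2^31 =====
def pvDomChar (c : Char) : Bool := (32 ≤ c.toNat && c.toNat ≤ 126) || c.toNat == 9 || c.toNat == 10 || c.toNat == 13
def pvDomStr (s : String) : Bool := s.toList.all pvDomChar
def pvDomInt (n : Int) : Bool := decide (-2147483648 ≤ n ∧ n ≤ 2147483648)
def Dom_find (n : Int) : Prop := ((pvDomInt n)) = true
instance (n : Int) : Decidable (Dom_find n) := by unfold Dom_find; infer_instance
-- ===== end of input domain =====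

-- B scans only a short final window (its width is nine times the digit count of n, which
-- bounds any digit sum there) instead of every candidate below n, and computes digit sums
-- arithmetically instead of via the decimal string; objective: faster.

-- ===== PORT A =====
-- A's inner loop: sum = i; for x in str(i): sum += int(x)
-- (int(x) never raises here: every char of str(i) for i >= 0 is a decimal digit,
--  so the `.getD 0` default is never used)
def findSumA (i : Int) : Int :=
  (PySem.Int.toChars i).foldl (fun s x => s + ((PySem.Int.ofChars? [x]).getD 0)) i

-- A's for-loop with break: the first i whose sum == n becomes result, else result stays 0
def findGoA (n : Int) : List Int → Int
  | [] => 0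
  | i :: rest => if findSumA i = n then i else findGoA n rest

def find (n : Int) : Int := findGoA n (PySem.List.pyRange 0 n)

-- ===== PORT B =====
-- B's while loop: s, m = i, i; while m: s += m % 10; m //= 10
-- (m starts at i >= 0 and stays nonnegative, so Nat % and / are exactly Python's % and //)
def bLoop (s : Int) (m : Nat) : Int :=
  if h : m = 0 then s else bLoop (s + ((m % 10 : Nat) : Int)) (m / 10)
decreasing_by exact Nat.div_lt_self (Nat.pos_of_ne_zero h) (by norm_num)

def findGoB (n : Int) : List Int → Int
  | [] => 0
  | i :: rest => if bLoop i i.toNat = n then i else findGoB n rest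
def find_alt (n : Int) : Int :=
  let start := max 0 (n - 9 * ((PySem.Int.toChars n).length : Int))
  findGoB n (PySem.List.pyRange start n)

-- ===== PRECONDITION & SPEC =====
def Spec_find (n : Int) (out : Int) : Prop := out = find_alt n
instance (n : Int) (out : Int) : Decidable (Spec_find n out) := by unfold Spec_find; infer_instance

-- ===== CLAIM (what is proved, stated in full; the proofs are below) =====
def Claim_equal_find : Prop := ∀ (n : Int), Dom_find n → Spec_find n (find n)

-- ===== LEMMAS AND PROOFS =====

-- digit-value sum of a char list: A's inner fold restarted at 0
def csum (l : List Char) : Int :=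
  l.foldl (fun s x => s + ((PySem.Int.ofChars? [x]).getD 0)) 0
theorem csum_foldl (l : List Char) (s : Int) :
    l.foldl (fun s x => s + ((PySem.Int.ofChars? [x]).getD 0)) s = s + csum l := by
  induction l generalizing s with
  | nil => simp [csum]
  | cons c l ih => simp only [csum, List.foldl_cons] at *; rw [ih, ih (s := 0 + _)]; ring
theorem csum_cons (c : Char) (l : List Char) :
    csum (c :: l) = ((PySem.Int.ofChars? [c]).getD 0) + csum l := by
  show List.foldl _ _ _ = _
  rw [List.foldl_cons, csum_foldl]; ring
theorem bLoop_shift (m : Nat) (s : Int) : bLoop s m = s + bLoop 0 m := by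
  induction m using Nat.strong_induction_on generalizing s with
  | _ m ih =>
    by_cases h : m = 0
    · simp [h, bLoop]
    · rw [bLoop, dif_neg h, ih _ (Nat.div_lt_self (Nat.pos_of_ne_zero h) (by norm_num)),
        show bLoop 0 m = bLoop (0 + ((m % 10 : Nat) : Int)) (m / 10) by rw [bLoop, dif_neg h],
        ih _ (Nat.div_lt_self (Nat.pos_of_ne_zero h) (by norm_num)) (s := 0 + _)]
      ring
theorem digitChar_val (k : Nat) (hk : k < 10) :
    ((PySem.Int.ofChars? [Nat.digitChar k]).getD 0) = (k : Int) := by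
  interval_cases k <;> decide
theorem csum_toDigitsCore (f : Nat) : ∀ (m : Nat) (l : List Char), m < f →
    csum (Nat.toDigitsCore 10 f m l) = bLoop 0 m + csum l := by
  induction f with
  | zero => intro m l h; omega
  | succ f ih =>
    intro m l h
    by_cases h10 : m / 10 = 0
    · have hm : m < 10 := by omega
      simp only [Nat.toDigitsCore, h10, if_true, csum_cons, digitChar_val _ (Nat.mod_lt m (by norm_num))]
      by_cases h0 : m = 0
      · simp [h0, bLoop]
      · rw [bLoop, dif_neg h0, Nat.mod_eq_of_lt hm, h10, bLoop, dif_pos rfl]; ring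
    · simp only [Nat.toDigitsCore, h10, if_false]
      rw [ih _ _ (by omega), csum_cons, digitChar_val _ (Nat.mod_lt m (by omega)),
        show bLoop 0 m = bLoop (0 + ((m % 10 : Nat) : Int)) (m / 10) by
          rw [bLoop, dif_neg (by omega)],
        bLoop_shift (m/10) (0 + ((m % 10 : Nat) : Int))]
      ring
theorem csum_toDigits (m : Nat) : csum (Nat.toDigits 10 m) = bLoop 0 m := by
  have := csum_toDigitsCore (m + 1) m [] (by omega)
  simpa [Nat.toDigits, csum] using this
theorem findSumA_eq (i : Int) (hi : 0 ≤ i) : findSumA i = bLoop i i.toNat := by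
  rw [findSumA, PySem.Int.toChars, if_neg (by omega), csum_foldl, csum_toDigits,
    bLoop_shift i.toNat i]

theorem lt_pow_len (f : Nat) : ∀ (m : Nat), m < f →
    m < 10 ^ (Nat.toDigitsCore 10 f m []).length := by
  induction f with
  | zero => omega
  | succ f ih =>
    intro m h
    by_cases h10 : m / 10 = 0
    · simp only [Nat.toDigitsCore, h10, if_true, List.length_cons, List.length_nil]
      omega
    · simp only [Nat.toDigitsCore, h10, if_false]
      rw [Nat.toDigitsCore_lens_eq]
      have := ih (m / 10) (by omega)
      have h9 : m % 10 < 10 := Nat.mod_lt m (by omega)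
      calc m = 10 * (m / 10) + m % 10 := by omega
        _ < 10 * (10 ^ (Nat.toDigitsCore 10 f (m / 10) []).length) := by omega
        _ = 10 ^ ((Nat.toDigitsCore 10 f (m / 10) []).length + 1) := by ring

theorem bLoop_le (e : Nat) : ∀ (m : Nat), m < 10 ^ e → bLoop 0 m ≤ 9 * e := by
  induction e with
  | zero => intro m h; interval_cases m; rw [bLoop]; simp
  | succ e ih =>
    intro m h
    by_cases h0 : m = 0
    · subst h0; rw [bLoop]; simp; positivity
    · rw [bLoop, dif_neg h0, bLoop_shift]
      have h1 : m / 10 < 10 ^ e := by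
        rw [Nat.div_lt_iff_lt_mul (by norm_num)]
        calc m < 10 ^ (e + 1) := h
          _ = 10 ^ e * 10 := by ring
      have := ih _ h1
      have h2 : m % 10 ≤ 9 := by omega
      push_cast
      omega

theorem go_congr (n : Int) (l : List Int) (h : ∀ i ∈ l, 0 ≤ i) :
    findGoA n l = findGoB n l := by
  induction l with
  | nil => rfl
  | cons i rest ih =>
    rw [findGoA, findGoB, findSumA_eq i (h i List.mem_cons_self)]
    rw [ih (fun j hj => h j (List.mem_cons_of_mem i hj))]

theorem go_skip (n : Int) (l l' : List Int) (h : ∀ i ∈ l, findSumA i ≠ n) :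
    findGoA n (l ++ l') = findGoA n l' := by
  induction l with
  | nil => rfl
  | cons i rest ih =>
    rw [List.cons_append, findGoA, if_neg (h i List.mem_cons_self)]
    exact ih (fun j hj => h j (List.mem_cons_of_mem i hj))

theorem find_eq_alt (n : Int) : find n = find_alt n := by
  rw [find, find_alt]
  rcases le_or_gt n 0 with hn | hn
  · rw [show PySem.List.pyRange 0 n = [] by
      rw [PySem.List.pyRange_one]; simp; omega]
    rw [show PySem.List.pyRange (max 0 (n - 9 * ((PySem.Int.toChars n).length : Int))) n = [] by
      rw [PySem.List.pyRange_one]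
      have : (n - max 0 (n - 9 * ((PySem.Int.toChars n).length : Int))).toNat = 0 := by
        simp only [Int.toNat_eq_zero]; omega
      simp [this]]
    rfl
  · set L : Int := ((PySem.Int.toChars n).length : Int) with hL
    set st : Int := max 0 (n - 9 * L) with hst
    have hL0 : 0 ≤ L := by positivity
    have h0st : 0 ≤ st := le_max_left _ _
    have hstn : st ≤ n := by omega
    have hpow : n.toNat < 10 ^ (PySem.Int.toChars n).length := by
      have h1 : PySem.Int.toChars n = Nat.toDigits 10 n.toNat := by
        rw [PySem.Int.toChars, if_neg (by omega)]
      rw [h1, Nat.toDigits]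
      exact lt_pow_len (n.toNat + 1) n.toNat (by omega)
    rw [PySem.List.pyRange_one_append 0 st n h0st hstn]
    rw [go_skip]
    · exact go_congr n _ (fun i hi => (PySem.List.mem_pyRange_one.mp hi).1.trans' h0st)
    · intro i hi
      rcases PySem.List.mem_pyRange_one.mp hi with ⟨hi0, hist⟩
      have hilt : i < n - 9 * L := by
        rcases max_cases 0 (n - 9 * L) with ⟨he, _⟩ | ⟨he, _⟩ <;> rw [← hst] at he <;> omega
      have hds : bLoop 0 i.toNat ≤ 9 * L := by
        have h1 : i.toNat < 10 ^ (PySem.Int.toChars n).length := by omega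
        have := bLoop_le _ _ h1
        rw [hL]
        exact this
      rw [findSumA_eq i hi0, bLoop_shift i.toNat i]
      omega

-- ===== VERDICT (by name: the statement is the Claim_ definition above) =====
theorem find_spec : Claim_equal_find := by
  intro n _
  show find n = find_alt n
  exact find_eq_alt n
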